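-- pv_equiv track=rewrite | github.com/Omega-Reasoning/ARC-Task-Generators-Inventory | arc_training_RD/taskaf902bf9.py | _is_rectangle
-- ===== SOURCE A (Python) =====
-- def _is_rectangle(corners):
--     """Check if 4 corners form a rectangle."""
--     if len(corners) != 4:
--         return False
--
--     rows = sorted(set(r for r, _ in corners))
--     cols = sorted(set(c for _, c in corners))
--
--     # Must have exactly 2 unique rows and 2 unique columns
--     if len(rows) != 2 or len(cols) != 2:
--         return False
--
--     # Check that we have corners at all 4 combinations
--     expected_corners = {(r, c) for r in rows for c in cols}
--     actual_corners = set(corners)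
--
--     return expected_corners == actual_corners
-- ===== SOURCE B (Python) =====
-- def _is_rectangle(corners):
--     """Check if 4 corners form a rectangle."""
--     if len(corners) != 4:
--         return False
--     s = sorted(corners)
--     return (s[0][0] == s[1][0] and s[2][0] == s[3][0] and s[0][0] < s[2][0]
--             and s[0][1] == s[2][1] and s[1][1] == s[3][1] and s[0][1] < s[1][1])
-- ===== Notes on version B (the rewrite author's own statement) =====
-- stated objective: simpler
-- what changed: Instead of deduplicating rows and columns into sets and comparing a built cross-product set against set(corners), B sorts the four corners lexicographically once and checks the rectangle pattern positionally with strict inequalities (which also rejects duplicates).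
import Mathlib
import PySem

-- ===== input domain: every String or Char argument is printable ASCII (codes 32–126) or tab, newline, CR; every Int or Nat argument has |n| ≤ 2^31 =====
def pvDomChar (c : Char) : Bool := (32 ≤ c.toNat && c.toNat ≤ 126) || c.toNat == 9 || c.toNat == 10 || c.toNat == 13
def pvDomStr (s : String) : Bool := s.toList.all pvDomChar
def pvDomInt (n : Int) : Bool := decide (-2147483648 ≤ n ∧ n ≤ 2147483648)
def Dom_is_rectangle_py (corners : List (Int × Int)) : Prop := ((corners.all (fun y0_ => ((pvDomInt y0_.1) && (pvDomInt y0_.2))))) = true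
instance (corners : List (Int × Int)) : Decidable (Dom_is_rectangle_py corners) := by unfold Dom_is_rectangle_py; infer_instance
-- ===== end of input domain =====

-- B replaces A's set-based cross-product comparison by one lexicographic sort plus a positional pattern check; objective: simpler.

-- ===== PORT A =====
def is_rectangle_py (corners : List (Int × Int)) : Bool :=
  if corners.length ≠ 4 then false
  else
    let rows := PySem.List.sorted (PySem.Set.ofList (corners.map (fun p => p.1))) (fun x => x) false
    let cols := PySem.List.sorted (PySem.Set.ofList (corners.map (fun p => p.2))) (fun x => x) false
    if rows.length ≠ 2 ∨ cols.length ≠ 2 then false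
    else
      let expected := PySem.Set.ofList (rows.flatMap (fun r => cols.map (fun c => (r, c))))
      let actual := PySem.Set.ofList corners
      PySem.Set.equal expected actual

-- ===== PORT B =====
def is_rectangle_py_alt (corners : List (Int × Int)) : Bool :=
  if corners.length ≠ 4 then false
  else
    match PySem.List.sorted2 corners (fun p => p.1) (fun p => p.2) false with
    | [p0, p1, p2, p3] =>
        decide (p0.1 = p1.1) && decide (p2.1 = p3.1) && decide (p0.1 < p2.1) &&
        decide (p0.2 = p2.2) && decide (p1.2 = p3.2) && decide (p0.2 < p1.2)
    | _ => false

-- ===== PRECONDITION & SPEC =====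
def Spec_is_rectangle_py (corners : List (Int × Int)) (out : Bool) : Prop := out = is_rectangle_py_alt corners
instance (corners : List (Int × Int)) (out : Bool) : Decidable (Spec_is_rectangle_py corners out) := by unfold Spec_is_rectangle_py; infer_instance

-- ===== CLAIM (what is proved, stated in full; the proofs are below) =====
def Claim_equal_is_rectangle_py : Prop := ∀ (corners : List (Int × Int)), Dom_is_rectangle_py corners → Spec_is_rectangle_py corners (is_rectangle_py corners)

-- ===== LEMMAS AND PROOFS =====

-- the common characterisation both programs decide
def IsRect (l : List (Int × Int)) : Prop :=
  ∃ x y u v : Int, x < y ∧ u < v ∧ l.Perm [(x, u), (x, v), (y, u), (y, v)]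

-- Python's lexicographic strict comparison on pairs (sorted2's comparator with keys fst, snd)
def lexlt (p q : Int × Int) : Bool :=
  decide (p.1 < q.1) || (!decide (q.1 < p.1) && decide (p.2 < q.2))

lemma sorted2_eq_foldl (xs : List (Int × Int)) :
    PySem.List.sorted2 xs (fun p => p.1) (fun p => p.2) false
      = xs.foldl (fun acc x => PySem.List.insertBy lexlt x acc) [] := rfl

-- weak order associated to lexlt
def lexle (p q : Int × Int) : Prop := lexlt q p = false

lemma lexle_of_lt {p q : Int × Int} (h : lexlt p q = true) : lexle p q := by
  simp [lexlt] at h; simp [lexle, lexlt]; omega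

lemma lexle_trans {p q r : Int × Int} (h1 : lexle p q) (h2 : lexle q r) : lexle p r := by
  simp [lexle, lexlt] at *; omega

lemma lexle_antisymm {p q : Int × Int} (h1 : lexle p q) (h2 : lexle q p) : p = q := by
  simp [lexle, lexlt] at *
  have : p.1 = q.1 ∧ p.2 = q.2 := by omega
  exact Prod.ext this.1 this.2

lemma pairwise_insertBy_lexle (x : Int × Int) (ys : List (Int × Int))
    (h : ys.Pairwise lexle) : (PySem.List.insertBy lexlt x ys).Pairwise lexle := by
  induction ys with
  | nil => simp [PySem.List.insertBy]
  | cons y ys ih =>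
    obtain ⟨hy, hys⟩ := List.pairwise_cons.mp h
    simp only [PySem.List.insertBy]
    split
    · rename_i hlt
      refine List.Pairwise.cons ?_ (List.Pairwise.cons hy hys)
      intro z hz
      rcases List.mem_cons.mp hz with rfl | hz
      · exact lexle_of_lt hlt
      · exact lexle_trans (lexle_of_lt hlt) (hy z hz)
    · rename_i hnlt
      refine List.Pairwise.cons ?_ (ih hys)
      intro z hz
      rw [PySem.List.mem_insertBy] at hz
      rcases hz with rfl | hz
      · simp only [lexle]
        exact Bool.eq_false_iff.mpr hnlt
      · exact hy z hz

lemma pairwise_foldl_insertBy (xs : List (Int × Int)) (acc : List (Int × Int))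
    (h : acc.Pairwise lexle) :
    (xs.foldl (fun acc x => PySem.List.insertBy lexlt x acc) acc).Pairwise lexle := by
  induction xs generalizing acc with
  | nil => simpa
  | cons x xs ih => exact ih _ (pairwise_insertBy_lexle x acc h)

lemma pairwise_sorted2 (xs : List (Int × Int)) :
    (PySem.List.sorted2 xs (fun p => p.1) (fun p => p.2) false).Pairwise lexle := by
  rw [sorted2_eq_foldl]; exact pairwise_foldl_insertBy xs [] (by simp)

-- uniqueness: any lex-strictly-increasing rearrangement IS sorted2's output
lemma sorted2_eq_of_perm_of_pairwise_lt (xs ys : List (Int × Int))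
    (hperm : ys.Perm xs) (hlt : ys.Pairwise (fun a b => lexlt a b = true)) :
    PySem.List.sorted2 xs (fun p => p.1) (fun p => p.2) false = ys := by
  have hs : (PySem.List.sorted2 xs (fun p => p.1) (fun p => p.2) false).Perm ys :=
    (PySem.List.sorted2_perm xs _ _ false).trans hperm.symm
  have h1 : (PySem.List.sorted2 xs (fun p => p.1) (fun p => p.2) false).Pairwise lexle :=
    pairwise_sorted2 xs
  have h2 : ys.Pairwise lexle := hlt.imp (fun h => lexle_of_lt h)
  exact List.Perm.eq_of_pairwise (fun a b _ _ h h' => lexle_antisymm h h') h1 h2 hs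

-- B decides IsRect
lemma B_iff (l : List (Int × Int)) : is_rectangle_py_alt l = true ↔ IsRect l := by
  constructor
  · intro h
    unfold is_rectangle_py_alt at h
    split at h
    · exact absurd h (by simp)
    · rename_i hlen
      have hslen : (PySem.List.sorted2 l (fun p : Int × Int => p.1) (fun p => p.2) false).length = 4 := by
        rw [(PySem.List.sorted2_perm l _ _ false).length_eq]
        omega
      obtain ⟨p0, p1, p2, p3, hmatch⟩ := List.length_eq_four.mp hslen
      rw [hmatch] at h
      simp only [Bool.and_eq_true, decide_eq_true_eq] at h
      obtain ⟨⟨⟨⟨⟨h01, h23⟩, h02⟩, hc02⟩, hc13⟩, hc01⟩ := h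
      refine ⟨p0.1, p2.1, p0.2, p1.2, h02, hc01, ?_⟩
      have hperm : l.Perm [p0, p1, p2, p3] := by
        have := PySem.List.sorted2_perm l (fun p : Int × Int => p.1) (fun p => p.2) false
        rw [hmatch] at this
        exact this.symm
      have e0 : p0 = (p0.1, p0.2) := rfl
      have e1 : p1 = (p0.1, p1.2) := Prod.ext h01.symm rfl
      have e2 : p2 = (p2.1, p0.2) := Prod.ext rfl hc02.symm
      have e3 : p3 = (p2.1, p1.2) := Prod.ext h23.symm hc13.symm
      rw [e0, e1, e2, e3] at hperm
      exact hperm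
  · rintro ⟨x, y, u, v, hxy, huv, hperm⟩
    have hlen : l.length = 4 := by simpa using hperm.length_eq
    have hsort : PySem.List.sorted2 l (fun p => p.1) (fun p => p.2) false
        = [(x, u), (x, v), (y, u), (y, v)] := by
      apply sorted2_eq_of_perm_of_pairwise_lt _ _ hperm.symm
      simp [lexlt]
      omega
    unfold is_rectangle_py_alt
    rw [if_neg (by simp [hlen]), hsort]
    simp
    omega

-- sorted(set(zs)) for a two-valued zs
lemma sorted_set_pair (zs : List Int) (x y : Int) (hxy : x < y)
    (hmem : ∀ z, z ∈ zs ↔ z = x ∨ z = y) :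
    PySem.List.sorted (PySem.Set.ofList zs) (fun z => z) false = [x, y] := by
  apply PySem.List.sorted_eq_of_perm_of_pairwise_lt
  · rw [List.perm_ext_iff_of_nodup (by simp [List.Nodup]; omega) (PySem.Set.nodup_ofList zs)]
    intro a
    rw [PySem.Set.mem_ofList, hmem]
    simp
  · simpa using hxy

lemma nodup_E (x y u v : Int) (hxy : x ≠ y) (huv : u ≠ v) :
    ([(x, u), (x, v), (y, u), (y, v)] : List (Int × Int)).Nodup := by
  simp [Prod.ext_iff]
  omega

lemma A_iff (l : List (Int × Int)) : is_rectangle_py l = true ↔ IsRect l := by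
  constructor
  · intro h
    unfold is_rectangle_py at h
    split at h
    · exact absurd h (by simp)
    · rename_i hlen
      simp only [] at h
      split at h
      · exact absurd h (by simp)
      · rename_i hlens
        push Not at hlens
        obtain ⟨hr2, hc2⟩ := hlens
        obtain ⟨x, y, hrows⟩ := List.length_eq_two.mp hr2
        obtain ⟨u, v, hcols⟩ := List.length_eq_two.mp hc2
        have hxy : x < y := by
          have := PySem.List.sorted_ofList_pairwise_lt (l.map (fun p => p.1))
          rw [hrows] at this
          simpa using this
        have huv : u < v := by
          have := PySem.List.sorted_ofList_pairwise_lt (l.map (fun p => p.2))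
          rw [hcols] at this
          simpa using this
        rw [hrows, hcols] at h
        have hE : ([(x, u), (x, v), (y, u), (y, v)] : List (Int × Int)).Nodup :=
          nodup_E x y u v hxy.ne huv.ne
        have hflat : ([x, y].flatMap (fun r => [u, v].map (fun c => (r, c))))
            = [(x, u), (x, v), (y, u), (y, v)] := by simp
        rw [hflat, PySem.Set.ofList_eq_self_of_nodup _ hE, PySem.Set.equal_iff] at h
        have hsub : ([(x, u), (x, v), (y, u), (y, v)] : List (Int × Int)) ⊆ l := by
          intro p hp
          have hmem := (h p).mp hp
          rwa [PySem.Set.mem_ofList] at hmem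
        have hperm : ([(x, u), (x, v), (y, u), (y, v)] : List (Int × Int)).Perm l :=
          (hE.subperm hsub).perm_of_length_le (by simp; omega)
        exact ⟨x, y, u, v, hxy, huv, hperm.symm⟩
  · rintro ⟨x, y, u, v, hxy, huv, hperm⟩
    have hlen : l.length = 4 := by simpa using hperm.length_eq
    have hrows : PySem.List.sorted (PySem.Set.ofList (l.map (fun p => p.1))) (fun z => z) false = [x, y] := by
      apply sorted_set_pair _ _ _ hxy
      intro z
      rw [List.Perm.mem_iff (hperm.map (fun p => p.1))]
      simp
    have hcols : PySem.List.sorted (PySem.Set.ofList (l.map (fun p => p.2))) (fun z => z) false = [u, v] := by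
      apply sorted_set_pair _ _ _ huv
      intro z
      rw [List.Perm.mem_iff (hperm.map (fun p => p.2))]
      simp
      tauto
    unfold is_rectangle_py
    rw [if_neg (by simp [hlen])]
    simp only [hrows, hcols]
    rw [if_neg (by simp)]
    have hflat : ([x, y].flatMap (fun r => [u, v].map (fun c => (r, c))))
        = [(x, u), (x, v), (y, u), (y, v)] := by simp
    rw [hflat, PySem.Set.ofList_eq_self_of_nodup _ (nodup_E x y u v hxy.ne huv.ne),
      PySem.Set.equal_iff]
    intro p
    rw [PySem.Set.mem_ofList, hperm.mem_iff]

-- ===== VERDICT (by name: the statement is the Claim_ definition above) =====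
theorem is_rectangle_py_spec : Claim_equal_is_rectangle_py := by
  intro corners _
  unfold Spec_is_rectangle_py
  rw [Bool.eq_iff_iff, A_iff, B_iff]
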